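-- pv_equiv track=rewrite | github.com/ayesha4698/cs4300sp2020-ag946-aw695-as2643-sjc339 | app/irsystem/controllers/cossim.py | boolean_search
-- ===== SOURCE A (Python) =====
-- def boolean_search(query_word, excluded_word, inverted_index):
--     """ Search the collection of documents for the given query_word
--         provided that the documents do not include the excluded_word
--
--     Arguments
--     =========
--
--     query_word: string,
--         The word we are searching for in our documents.
--
--     excluded_word: string,
--         The word excluded from our documents.
--
--     inverted_index: an inverted index as above
--
--
--     Returns
--     =======
--
--     results: list of ints
--         Sorted List of results (in increasing order) such that every element is a `doc_id`
--         that points to a document that satisfies the boolean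
--         expression of the query.
--
--     """
--     # initialize empty list
--     merged_list_M = []
--
--     # create sorted lists A (query word) and B (excluded word) of doc ids
--
--     A_query = [x[0] for x in inverted_index[query_word.lower()]]
--     B_excluded = [x[0] for x in inverted_index[excluded_word.lower()]]
--
--     # start pointers at first elements
--     A_i = 0
--     B_j = 0
--
--     # search algorithm
--     while A_i < len(A_query) and B_j < len(B_excluded):
--         if A_query[A_i] == B_excluded[B_j]:
--             A_i += 1
--             B_j += 1
--         elif A_query[A_i] < B_excluded[B_j]:
--             merged_list_M.append(A_query[A_i])
--             A_i += 1
--         else: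
--             B_j += 1
--
--     # append rest of list A
--     merged_list_M += A_query[A_i:]
--
--     return merged_list_M
-- ===== SOURCE B (Python) =====
-- def boolean_search(query_word, excluded_word, inverted_index):
--     """Hash-set filter: build the set of excluded doc ids once, then keep
--     query doc ids not in it in a single comprehension (no merge, no pointers)."""
--     excluded = {x[0] for x in inverted_index[excluded_word.lower()]}
--     return [x[0] for x in inverted_index[query_word.lower()] if x[0] not in excluded]
-- ===== Notes on version B (the rewrite author's own statement) =====
-- stated objective: idiomatic
-- what changed: Replaces A's two-pointer sorted-merge (interleaved three-way loop plus remainder append) by building a hash set of the excluded doc ids once and filtering the query posting list by set membership in one comprehension; Pre_ excludes posting lists that both break the inverted-index convention (unsorted or duplicated doc ids) and share a doc id — inputs no caller of this index supplies, on which either result is as defensible as the other.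
-- outside the precondition, e.g. on boolean_search('a', 'b', {'a': [(1, 0), (1, 0)], 'b': [(1, 0)]}): A returns [1], B returns []; on boolean_search('a', 'b', {'a': [(2, 0)], 'b': [(3, 0), (2, 0)]}): A returns [2], B returns []
import Mathlib
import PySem

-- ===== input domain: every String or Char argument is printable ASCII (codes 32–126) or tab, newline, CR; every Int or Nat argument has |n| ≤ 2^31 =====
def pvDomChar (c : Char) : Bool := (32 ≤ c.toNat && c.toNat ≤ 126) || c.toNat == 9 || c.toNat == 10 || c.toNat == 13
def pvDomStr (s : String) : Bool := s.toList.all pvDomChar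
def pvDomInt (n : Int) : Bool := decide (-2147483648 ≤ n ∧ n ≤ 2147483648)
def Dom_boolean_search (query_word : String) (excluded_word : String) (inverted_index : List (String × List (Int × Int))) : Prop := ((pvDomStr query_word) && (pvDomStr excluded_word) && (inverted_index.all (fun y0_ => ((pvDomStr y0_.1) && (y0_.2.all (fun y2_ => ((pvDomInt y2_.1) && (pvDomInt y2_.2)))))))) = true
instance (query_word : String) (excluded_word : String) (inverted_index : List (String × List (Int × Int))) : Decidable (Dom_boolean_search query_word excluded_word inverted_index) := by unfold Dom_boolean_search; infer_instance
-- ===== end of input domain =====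

-- B replaces A's two-pointer sorted-merge by a hash set of the excluded doc ids plus one filtering
-- pass over the query posting list; equal on conventional posting lists (Pre_: sorted, unique query ids).

-- ===== PORT A =====
-- A's while loop; the index pointers A_i / B_j become the remaining suffixes of the two posting
-- lists, merged_list_M is the accumulator; the final `M ++ as` is `merged_list_M += A_query[A_i:]`
theorem bsLoop_dec0 {α : Type} (as bs : List α) (a b : α) : as.length + bs.length < (a :: as).length + (b :: bs).length := by simp [List.length_cons]; omega
theorem bsLoop_dec1 {α : Type} (as bs : List α) (a b : α) : as.length + (b :: bs).length < (a :: as).length + (b :: bs).length := by simp [List.length_cons]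
theorem bsLoop_dec2 {α : Type} (as bs : List α) (a b : α) : (a :: as).length + bs.length < (a :: as).length + (b :: bs).length := by simp [List.length_cons]
def bsLoop (A B M : List Int) : List Int :=
  match A, B with
  | a :: as, b :: bs =>
      if a = b then bsLoop as bs M
      else if a < b then bsLoop as (b :: bs) (M ++ [a])
      else bsLoop (a :: as) bs M
  | as, _ => M ++ as
termination_by A.length + B.length
decreasing_by
  · exact bsLoop_dec0 as bs a b
  · exact bsLoop_dec1 as bs a b
  · exact bsLoop_dec2 as bs a b

def boolean_search (query_word : String) (excluded_word : String) (inverted_index : List (String × List (Int × Int))) : List Int :=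
  match (PySem.Dict.mk inverted_index).get? (PySem.Str.lower query_word),
        (PySem.Dict.mk inverted_index).get? (PySem.Str.lower excluded_word) with
  | some aEntry, some bEntry =>
      bsLoop (aEntry.map Prod.fst) (bEntry.map Prod.fst) []
  | _, _ => []  -- Python raises KeyError here; excluded by Pre_

-- ===== PORT B =====
def boolean_search_alt (query_word : String) (excluded_word : String) (inverted_index : List (String × List (Int × Int))) : List Int :=
  match (PySem.Dict.mk inverted_index).get? (PySem.Str.lower excluded_word) with
  | none => []  -- Python raises KeyError here; excluded by Pre_
  | some bEntry =>
    let excluded := PySem.Set.ofList (bEntry.map Prod.fst)   -- the set comprehension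
    match (PySem.Dict.mk inverted_index).get? (PySem.Str.lower query_word) with
    | none => []  -- Python raises KeyError here; excluded by Pre_
    | some aEntry =>
      (aEntry.map Prod.fst).filter (fun d => !(PySem.Set.contains excluded d))

-- ===== PRECONDITION & SPEC =====
-- Pre_ excludes (a) missing keys, on which A raises KeyError, and (b) posting lists that both break
-- the inverted-index convention (query doc ids not strictly increasing, or excluded doc ids not
-- sorted) and share a doc id — inputs no caller of this index supplies, on which either result is
-- as defensible as the other. (When the two id lists are disjoint or identical no sortedness is
-- needed: A keeps every query id, resp. drops all of them, just as B does.)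
def Pre_boolean_search (query_word : String) (excluded_word : String) (inverted_index : List (String × List (Int × Int))) : Prop :=
  ((PySem.Dict.mk inverted_index).get? (PySem.Str.lower query_word)).isSome
  ∧ ((PySem.Dict.mk inverted_index).get? (PySem.Str.lower excluded_word)).isSome
  ∧ (((((PySem.Dict.mk inverted_index).get? (PySem.Str.lower query_word)).getD []).map Prod.fst) = (((((PySem.Dict.mk inverted_index).get? (PySem.Str.lower excluded_word)).getD []).map Prod.fst))
      ∨ (∀ x ∈ ((((PySem.Dict.mk inverted_index).get? (PySem.Str.lower query_word)).getD []).map Prod.fst), x ∉ ((((PySem.Dict.mk inverted_index).get? (PySem.Str.lower excluded_word)).getD []).map Prod.fst))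
      ∨ (List.Pairwise (· < ·) (((((PySem.Dict.mk inverted_index).get? (PySem.Str.lower query_word)).getD []).map Prod.fst))
         ∧ List.Pairwise (· ≤ ·) (((((PySem.Dict.mk inverted_index).get? (PySem.Str.lower excluded_word)).getD []).map Prod.fst))))
instance (query_word : String) (excluded_word : String) (inverted_index : List (String × List (Int × Int))) : Decidable (Pre_boolean_search query_word excluded_word inverted_index) := by unfold Pre_boolean_search; infer_instance

def pvWitness_boolean_search : String × String × (List (String × List (Int × Int))) :=
  ("Cat", "dog", [("cat", [(1, 2), (3, 1), (7, 4)]), ("dog", [(3, 5), (9, 1)])])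

def Spec_boolean_search (query_word : String) (excluded_word : String) (inverted_index : List (String × List (Int × Int))) (out : List Int) : Prop := out = boolean_search_alt query_word excluded_word inverted_index
instance (query_word : String) (excluded_word : String) (inverted_index : List (String × List (Int × Int))) (out : List Int) : Decidable (Spec_boolean_search query_word excluded_word inverted_index out) := by unfold Spec_boolean_search; infer_instance

-- ===== CLAIM (what is proved, stated in full; the proofs are below) =====
def Claim_equal_boolean_search : Prop := ∀ (query_word : String) (excluded_word : String) (inverted_index : List (String × List (Int × Int))), Dom_boolean_search query_word excluded_word inverted_index → Pre_boolean_search query_word excluded_word inverted_index → Spec_boolean_search query_word excluded_word inverted_index (boolean_search query_word excluded_word inverted_index)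

-- ===== LEMMAS AND PROOFS =====

-- on a strictly increasing query list and a sorted excluded list, A's merge loop is exactly
-- "append the query ids not occurring in the excluded list"
lemma bsLoop_nil_left (B M : List Int) : bsLoop [] B M = M := by
  cases B with
  | nil => simp [bsLoop]
  | cons b bs =>
    rw [bsLoop]
    · simp
    · exact fun _ _ _ _ e _ => nomatch e

lemma bsLoop_nil_right (A M : List Int) : bsLoop A [] M = M ++ A := by
  rw [bsLoop]
  exact fun _ _ _ _ _ e => nomatch e

lemma bsLoop_eq_filter : ∀ (A B M : List Int), A.Pairwise (· < ·) → B.Pairwise (· ≤ ·) →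
    bsLoop A B M = M ++ A.filter (fun x => decide (x ∉ B)) := by
  intro A
  induction A with
  | nil => intro B M _ _; simp [bsLoop_nil_left]
  | cons a as ihA =>
    intro B
    induction B with
    | nil =>
      intro M _ _
      simp [bsLoop_nil_right]
    | cons b bs ihB =>
      intro M hA hB
      by_cases he : a = b
      · subst he
        rw [bsLoop, if_pos rfl, ihA bs M hA.of_cons hB.of_cons]
        have hmem : ∀ x ∈ as, decide (x ∉ (a :: bs)) = decide (x ∉ bs) := by
          intro x hx
          have hax : a < x := (List.pairwise_cons.mp hA).1 x hx
          simp [List.mem_cons, show x ≠ a by omega]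
        rw [List.filter_cons, if_neg (by simp)]
        exact congrArg (M ++ ·) (List.filter_congr hmem).symm
      · by_cases hlt : a < b
        · rw [bsLoop, if_neg he, if_pos hlt, ihA (b :: bs) (M ++ [a]) hA.of_cons hB]
          have hnb : a ∉ b :: bs := by
            have hall : ∀ x ∈ bs, b ≤ x := (List.pairwise_cons.mp hB).1
            intro h
            rcases List.mem_cons.mp h with h | h
            · omega
            · have := hall a h; omega
          rw [List.filter_cons, if_pos (decide_eq_true hnb)]
          simp
        · have hba : b < a := by omega
          rw [bsLoop, if_neg he, if_neg hlt, ihB M hA hB.of_cons]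
          have hmem : ∀ x ∈ a :: as, decide (x ∉ (b :: bs)) = decide (x ∉ bs) := by
            intro x hx
            have hax : a ≤ x := by
              rcases List.mem_cons.mp hx with h | h
              · omega
              · have := (List.pairwise_cons.mp hA).1 x h; omega
            simp [List.mem_cons, show x ≠ b by omega]
          rw [List.filter_congr hmem]

-- on two identical lists the merge always takes the equality branch and drops everything
lemma bsLoop_self : ∀ (A M : List Int), bsLoop A A M = M := by
  intro A
  induction A with
  | nil => intro M; exact bsLoop_nil_left [] M
  | cons a as ih => intro M; rw [bsLoop, if_pos rfl]; exact ih M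

-- with disjoint id lists only the equality branch could drop a query id, so A's merge keeps all of A
lemma bsLoop_disjoint : ∀ (A B M : List Int), (∀ x ∈ A, x ∉ B) → bsLoop A B M = M ++ A := by
  intro A
  induction A with
  | nil => intro B M _; simp [bsLoop_nil_left]
  | cons a as ihA =>
    intro B
    induction B with
    | nil => intro M _; exact bsLoop_nil_right _ _
    | cons b bs ihB =>
      intro M hd
      have hne : a ≠ b := fun h => (hd a (List.mem_cons_self)) (h ▸ List.mem_cons_self)
      by_cases hlt : a < b
      · rw [bsLoop, if_neg hne, if_pos hlt,
            ihA (b :: bs) (M ++ [a]) (fun x hx => hd x (List.mem_cons_of_mem a hx))]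
        simp
      · rw [bsLoop, if_neg hne, if_neg hlt]
        exact ihB M (fun x hx h => hd x hx (List.mem_cons_of_mem b h))

-- membership in the set built from the excluded list is membership in the list
lemma set_not_contains_ofList (l : List Int) (y : Int) :
    (!(PySem.Set.contains (PySem.Set.ofList l) y)) = decide (y ∉ l) := by
  simp [PySem.Set.contains_eq_listContains, List.contains_eq_mem, PySem.Set.mem_ofList]

theorem boolean_search_eq (query_word excluded_word : String) (inverted_index : List (String × List (Int × Int)))
    (hp : Pre_boolean_search query_word excluded_word inverted_index) :
    boolean_search query_word excluded_word inverted_index = boolean_search_alt query_word excluded_word inverted_index := by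
  obtain ⟨h1, h2, hs⟩ := hp
  obtain ⟨aEntry, hq⟩ := Option.isSome_iff_exists.mp h1
  obtain ⟨bEntry, he⟩ := Option.isSome_iff_exists.mp h2
  rw [hq, Option.getD_some] at hs
  rw [he, Option.getD_some] at hs
  unfold boolean_search boolean_search_alt
  rw [hq, he]
  dsimp only
  rcases hs with heq | hd | ⟨hsA, hsB⟩
  · rw [heq, bsLoop_self, List.filter_eq_nil_iff.mpr (fun x hx => by
      rw [set_not_contains_ofList]
      simp only [decide_eq_true_eq, not_not]
      exact hx)]
  · rw [bsLoop_disjoint _ _ _ hd, List.nil_append,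
        List.filter_eq_self.mpr (fun x hx => by
          rw [set_not_contains_ofList]; exact decide_eq_true (hd x hx))]
  · rw [bsLoop_eq_filter _ _ _ hsA hsB, List.nil_append]
    exact (List.filter_congr (fun x _ => set_not_contains_ofList _ x)).symm

-- ===== VERDICT (by name: the statement is the Claim_ definition above) =====
theorem boolean_search_spec : Claim_equal_boolean_search := by
  intro q e idx _ hp
  unfold Spec_boolean_search
  exact boolean_search_eq q e idx hp
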